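-- pv_equiv track=rewrite | github.com/MrBrantCode/unitest_baseline | mut_generate/mist_train_cf/cf_57101/solution.py | string_analyzer
-- ===== SOURCE A (Python) =====
-- def string_analyzer(s):
--     """
--     Analyzes the input string, ignoring white spaces, and returns the count of
--     uppercase letters, lowercase letters, numbers, and special characters.
--     Additionally, it checks if the string is a palindrome.
--
--     Args:
--         s (str): The input string.
--
--     Returns:
--         tuple: A tuple containing the count of uppercase letters, lowercase letters,
--         numbers, special characters, and a boolean indicating whether the string is a palindrome.
--     """
--     remove_spaces = s.replace(" ", "")
--     uppercase, lowercase, numbers, special = 0, 0, 0, 0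
--     for char in remove_spaces:
--         if char.isupper():
--             uppercase += 1
--         elif char.islower():
--             lowercase += 1
--         elif char.isdigit():
--             numbers += 1
--         else:
--             special += 1
--
--     reverse_s = remove_spaces[::-1]
--     palindrome = reverse_s.lower() == remove_spaces.lower()
--
--     return uppercase, lowercase, numbers, special, palindrome
-- ===== SOURCE B (Python) =====
-- def string_analyzer(s):
--     t = s.replace(" ", "")
--     uppercase = sum(1 for c in t if c.isupper())
--     lowercase = sum(1 for c in t if c.islower())
--     numbers = sum(1 for c in t if c.isdigit())
--     special = len(t) - uppercase - lowercase - numbers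
--     palindrome = True
--     i, j = 0, len(t) - 1
--     while i < j:
--         if t[i].lower() != t[j].lower():
--             palindrome = False
--             break
--         i += 1
--         j -= 1
--     return uppercase, lowercase, numbers, special, palindrome
-- ===== Notes on version B (the rewrite author's own statement) =====
-- stated objective: alternative
-- what changed: Counting becomes per-category countP passes with special derived as length minus the other three, and the reverse-and-compare palindrome check is replaced by a two-pointer index loop with early exit.
import Mathlib
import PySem

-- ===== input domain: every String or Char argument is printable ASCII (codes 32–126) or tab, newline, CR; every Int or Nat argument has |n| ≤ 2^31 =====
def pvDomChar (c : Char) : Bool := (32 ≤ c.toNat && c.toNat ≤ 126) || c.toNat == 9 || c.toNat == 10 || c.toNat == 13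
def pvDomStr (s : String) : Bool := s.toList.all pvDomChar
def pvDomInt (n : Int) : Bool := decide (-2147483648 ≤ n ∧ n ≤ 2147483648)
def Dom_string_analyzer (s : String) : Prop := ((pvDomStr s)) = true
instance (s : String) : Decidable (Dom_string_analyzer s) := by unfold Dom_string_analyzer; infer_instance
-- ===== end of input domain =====

-- B replaces A's single elif-chain counting loop by four per-category count passes
-- (special = length minus the other three) and A's reverse-and-compare palindrome
-- check by a two-pointer index loop with early exit (objective: alternative).

-- ===== PORT A =====
-- one step of A's elif chain over the running (uppercase, lowercase, numbers, special) tuple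
def saStepA (acc : Int × Int × Int × Int) (c : Char) : Int × Int × Int × Int :=
  if PySem.Chars.isupper c then (acc.1 + 1, acc.2.1, acc.2.2.1, acc.2.2.2)
  else if PySem.Chars.islower c then (acc.1, acc.2.1 + 1, acc.2.2.1, acc.2.2.2)
  else if PySem.Chars.isdigit c then (acc.1, acc.2.1, acc.2.2.1 + 1, acc.2.2.2)
  else (acc.1, acc.2.1, acc.2.2.1, acc.2.2.2 + 1)

def string_analyzer (s : String) : Int × Int × Int × Int × Bool :=
  let removeSpaces := (PySem.Str.replace s " " "").toList
  let acc := removeSpaces.foldl saStepA (0, 0, 0, 0)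
  -- remove_spaces[::-1]; the step -1 is nonzero, so slice? is always some
  let reverseS := (PySem.List.slice? removeSpaces none none (-1)).getD []
  let palindrome := PySem.Chars.lower reverseS == PySem.Chars.lower removeSpaces
  (acc.1, acc.2.1, acc.2.2.1, acc.2.2.2, palindrome)

-- ===== PORT B =====
-- B's two-pointer while loop; t[i]/t[j] are only read with i < j ≤ len-1, so getD is exact there
def saPalB (t : List Char) (i j : Nat) : Bool :=
  if i < j then
    if PySem.Chars.lowerChar (t.getD i ' ') == PySem.Chars.lowerChar (t.getD j ' ') then
      saPalB t (i + 1) (j - 1)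
    else false
  else true
termination_by j - i
decreasing_by omega

def string_analyzer_alt (s : String) : Int × Int × Int × Int × Bool :=
  let t := (PySem.Str.replace s " " "").toList
  let uppercase : Int := (t.countP PySem.Chars.isupper : Nat)
  let lowercase : Int := (t.countP PySem.Chars.islower : Nat)
  let numbers : Int := (t.countP PySem.Chars.isdigit : Nat)
  let special : Int := (t.length : Int) - uppercase - lowercase - numbers
  (uppercase, lowercase, numbers, special, saPalB t 0 (t.length - 1))

-- ===== PRECONDITION & SPEC =====
def Spec_string_analyzer (s : String) (out : Int × Int × Int × Int × Bool) : Prop := out = string_analyzer_alt s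
instance (s : String) (out : Int × Int × Int × Int × Bool) : Decidable (Spec_string_analyzer s out) := by unfold Spec_string_analyzer; infer_instance

-- ===== CLAIM (what is proved, stated in full; the proofs are below) =====
def Claim_equal_string_analyzer : Prop := ∀ (s : String), Dom_string_analyzer s → Spec_string_analyzer s (string_analyzer s)

-- ===== LEMMAS AND PROOFS =====

-- the three category predicates are pairwise disjoint (they are disjoint ASCII code ranges)
theorem sa_upper_not_lower {c : Char} (h : PySem.Chars.isupper c = true) :
    PySem.Chars.islower c = false := by
  simp only [PySem.Chars.isupper, Bool.and_eq_true, decide_eq_true_eq, Char.le_def,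
    UInt32.le_iff_toNat_le] at h
  simp only [PySem.Chars.islower, Bool.and_eq_false_iff, decide_eq_false_iff_not, Char.le_def,
    UInt32.le_iff_toNat_le]
  have h1 : 'Z'.val.toNat = 90 := rfl
  have h2 : 'a'.val.toNat = 97 := rfl
  omega

theorem sa_upper_not_digit {c : Char} (h : PySem.Chars.isupper c = true) :
    PySem.Chars.isdigit c = false := by
  simp only [PySem.Chars.isupper, Bool.and_eq_true, decide_eq_true_eq, Char.le_def,
    UInt32.le_iff_toNat_le] at h
  simp only [PySem.Chars.isdigit, Bool.and_eq_false_iff, decide_eq_false_iff_not, Char.le_def,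
    UInt32.le_iff_toNat_le]
  have h1 : 'A'.val.toNat = 65 := rfl
  have h2 : '9'.val.toNat = 57 := rfl
  omega

theorem sa_lower_not_digit {c : Char} (h : PySem.Chars.islower c = true) :
    PySem.Chars.isdigit c = false := by
  simp only [PySem.Chars.islower, Bool.and_eq_true, decide_eq_true_eq, Char.le_def,
    UInt32.le_iff_toNat_le] at h
  simp only [PySem.Chars.isdigit, Bool.and_eq_false_iff, decide_eq_false_iff_not, Char.le_def,
    UInt32.le_iff_toNat_le]
  have h1 : 'a'.val.toNat = 97 := rfl
  have h2 : '9'.val.toNat = 57 := rfl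
  omega

-- A's elif-chain fold computes the three countP's plus the complement count
theorem sa_fold_count (t : List Char) : ∀ (u l n sp : Int),
    t.foldl saStepA (u, l, n, sp) =
      (u + (t.countP PySem.Chars.isupper : Nat),
       l + (t.countP PySem.Chars.islower : Nat),
       n + (t.countP PySem.Chars.isdigit : Nat),
       sp + ((t.length : Int) - (t.countP PySem.Chars.isupper : Nat)
             - (t.countP PySem.Chars.islower : Nat) - (t.countP PySem.Chars.isdigit : Nat))) := by
  induction t with
  | nil => intro u l n sp; simp
  | cons c t ih =>
    intro u l n sp
    by_cases hu : PySem.Chars.isupper c = true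
    · simp [saStepA, hu, sa_upper_not_lower hu, sa_upper_not_digit hu, ih,
        Prod.mk.injEq]
      all_goals omega
    · by_cases hl : PySem.Chars.islower c = true
      · simp [saStepA, hu, hl, sa_lower_not_digit hl, ih, Prod.mk.injEq]
        all_goals omega
      · by_cases hd : PySem.Chars.isdigit c = true
        · simp [saStepA, hu, hl, hd, ih, Prod.mk.injEq]
          all_goals omega
        · simp [saStepA, hu, hl, hd, ih, Prod.mk.injEq]
          all_goals omega

-- the pairs the two-pointer loop compares are exactly (a, b) with a + b = i + j, i ≤ a < b
theorem saPalB_iff (t : List Char) : ∀ (i j : Nat),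
    saPalB t i j = true ↔
      ∀ a b : Nat, a + b = i + j → i ≤ a → a < b →
        PySem.Chars.lowerChar (t.getD a ' ') = PySem.Chars.lowerChar (t.getD b ' ') := by
  intro i j
  fun_induction saPalB t i j with
  | case1 i j hij heq ih =>
    rw [ih]
    constructor
    · intro h a b hab ha hlt
      rcases Nat.eq_or_lt_of_le ha with h' | h'
      · subst h'
        have hbj : b = j := by omega
        subst hbj
        exact beq_iff_eq.mp heq
      · exact h a b (by omega) (by omega) hlt
    · intro h a b hab ha hlt
      exact h a b (by omega) (by omega) hlt
  | case2 i j hij hne =>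
    simp only [Bool.false_eq_true, false_iff, not_forall]
    exact ⟨i, j, rfl, le_rfl, hij, fun hc => hne (beq_iff_eq.mpr hc)⟩
  | case3 i j hij =>
    simp only [true_iff]
    intro a b hab ha hlt
    omega

-- A's reverse-and-compare equals B's two-pointer loop
theorem sa_pal_eq (t : List Char) :
    (PySem.Chars.lower t.reverse == PySem.Chars.lower t) = saPalB t 0 (t.length - 1) := by
  rcases Nat.eq_zero_or_pos t.length with h0 | hpos
  · have ht : t = [] := List.eq_nil_of_length_eq_zero h0
    subst ht
    simp [saPalB]
  · rw [Bool.eq_iff_iff, beq_iff_eq, saPalB_iff]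
    have hlen : (PySem.Chars.lower t).length = t.length := by simp [PySem.Chars.lower]
    have hrev : PySem.Chars.lower t.reverse = (PySem.Chars.lower t).reverse := by
      simp [PySem.Chars.lower]
    constructor
    · intro h a b hab ha hlt
      have hb : b < t.length := by omega
      have ha' : a < t.length := by omega
      have h1 : (PySem.Chars.lower t.reverse)[a]? = (PySem.Chars.lower t)[a]? := by rw [h]
      rw [hrev, List.getElem?_reverse (by omega)] at h1
      have hidx : (PySem.Chars.lower t).length - 1 - a = b := by omega
      rw [hidx] at h1
      simp only [PySem.Chars.lower, List.getElem?_map,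
        List.getElem?_eq_getElem ha', List.getElem?_eq_getElem hb, Option.map_some] at h1
      rw [List.getD_eq_getElem _ _ ha', List.getD_eq_getElem _ _ hb]
      exact (Option.some.inj h1).symm
    · intro h
      rw [hrev]
      apply List.ext_getElem (by simp)
      intro k h1 h2
      rw [List.getElem_reverse]
      have hk : k < t.length := by omega
      have hk' : t.length - 1 - k < t.length := by omega
      simp only [PySem.Chars.lower, List.getElem_map, List.length_map]
      rcases lt_trichotomy k (t.length - 1 - k) with hc | hc | hc
      · have hkk := h k (t.length - 1 - k) (by omega) (Nat.zero_le _) hc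
        rw [List.getD_eq_getElem _ _ hk, List.getD_eq_getElem _ _ hk'] at hkk
        exact hkk.symm
      · simp only [← hc]
      · have hkk := h (t.length - 1 - k) k (by omega) (Nat.zero_le _) hc
        rw [List.getD_eq_getElem _ _ hk', List.getD_eq_getElem _ _ hk] at hkk
        exact hkk

-- ===== VERDICT (by name: the statement is the Claim_ definition above) =====
theorem string_analyzer_spec : Claim_equal_string_analyzer := by
  intro s _
  unfold Spec_string_analyzer string_analyzer string_analyzer_alt
  simp only [PySem.List.slice?_none_none_neg_one, Option.getD_some]
  rw [sa_fold_count, sa_pal_eq]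
  simp
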